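-- pv_equiv track=rewrite | github.com/oscarblanco86/fccDailyChallenge | dailyChallenge/python/2026/02/22.py | count_medals
-- ===== SOURCE A (Python) =====
-- def count_medals(winners):
--     # Step 1: Count medals
--     medals = {}
--
--     for gold, silver, bronze in winners:
--         for country, medal in [(gold, "Gold"), (silver, "Silver"), (bronze, "Bronze")]:
--             if country not in medals:
--                 medals[country] = {"Gold": 0, "Silver": 0, "Bronze": 0}
--             medals[country][medal] += 1
--
--     # Step 2: Compute totals
--     for country in medals:
--         m = medals[country]
--         medals[country]["Total"] = m["Gold"] + m["Silver"] + m["Bronze"]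
--
--     # Step 3: Sort by gold DESC, then alphabetically ASC
--     sorted_countries = sorted(
--         medals.items(),
--         key=lambda item: (-item[1]["Gold"], item[0])
--     )
--
--     # Step 4: Build CSV output
--     lines = ["Country,Gold,Silver,Bronze,Total"]
--     for country, m in sorted_countries:
--         line = f"{country},{m['Gold']},{m['Silver']},{m['Bronze']},{m['Total']}"
--         lines.append(line)
--
--     return "\n".join(lines)
-- ===== SOURCE B (Python) =====
-- def _tally(xs):
--     counts = {}
--     for x in xs:
--         counts[x] = counts.get(x, 0) + 1
--     return counts
--
--
-- def count_medals(winners):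
--     rows = list(winners)
--     golds = _tally(g for g, s, b in rows)
--     silvers = _tally(s for g, s, b in rows)
--     bronzes = _tally(b for g, s, b in rows)
--     countries = golds.keys() | silvers.keys() | bronzes.keys()
--     ordered = sorted(countries, key=lambda c: (-golds.get(c, 0), c))
--     lines = ["Country,Gold,Silver,Bronze,Total"]
--     for c in ordered:
--         g = golds.get(c, 0)
--         s = silvers.get(c, 0)
--         b = bronzes.get(c, 0)
--         lines.append(f"{c},{g},{s},{b},{g + s + b}")
--     return "\n".join(lines)
-- ===== Notes on version B (the rewrite author's own statement) =====
-- stated objective: alternative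
-- what changed: Replaces A's single interleaved pass building a nested per-country dict (with a second pass injecting 'Total' entries) by three independent per-column tallies, a set union of their key sets, a sort of bare country names by (-gold, name), and totals computed on the fly while formatting.
import Mathlib
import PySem

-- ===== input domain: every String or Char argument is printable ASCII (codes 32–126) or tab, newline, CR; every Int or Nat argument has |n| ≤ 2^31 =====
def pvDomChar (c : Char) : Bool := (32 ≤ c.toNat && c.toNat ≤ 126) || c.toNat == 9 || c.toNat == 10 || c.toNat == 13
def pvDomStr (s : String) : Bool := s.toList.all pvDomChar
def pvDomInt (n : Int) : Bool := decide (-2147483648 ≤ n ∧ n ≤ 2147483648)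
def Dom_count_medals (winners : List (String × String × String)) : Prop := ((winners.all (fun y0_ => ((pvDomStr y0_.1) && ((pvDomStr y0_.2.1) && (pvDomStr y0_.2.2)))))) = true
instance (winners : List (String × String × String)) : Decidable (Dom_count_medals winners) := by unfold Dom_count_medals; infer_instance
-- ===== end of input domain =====

-- B replaces A's single interleaved pass over a nested per-country dict (plus a totals pass)
-- by three independent per-column tallies, a key-set union, a sort of bare country names and
-- totals computed while formatting; same return value (objective: alternative).

-- ===== PORT A =====
-- Python's medals[country][medal] += 1 / m["Gold"] accesses only ever hit present keys,
-- so modify/getD with a default is exact here (no KeyError is reachable).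
def count_medals (winners : List (String × String × String)) : String :=
  -- Step 1: Count medals
  let medals : PySem.Dict String (PySem.Dict String Int) :=
    winners.foldl (fun medals row =>
      [(row.1, "Gold"), (row.2.1, "Silver"), (row.2.2, "Bronze")].foldl
        (fun medals cm =>
          let medals :=
            if medals.contains cm.1 then medals
            else medals.insert cm.1 (PySem.Dict.ofList [("Gold", 0), ("Silver", 0), ("Bronze", 0)])
          medals.modify cm.1 (PySem.Dict.ofList [("Gold", 0), ("Silver", 0), ("Bronze", 0)])
            (fun m => m.modify cm.2 0 (· + 1)))
        medals)
      PySem.Dict.empty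
  -- Step 2: Compute totals
  let medals :=
    medals.keys.foldl (fun d country =>
      d.modify country (PySem.Dict.ofList [("Gold", 0), ("Silver", 0), ("Bronze", 0)])
        (fun m => m.insert "Total" (m.getD "Gold" 0 + m.getD "Silver" 0 + m.getD "Bronze" 0)))
      medals
  -- Step 3: Sort by gold DESC, then alphabetically ASC
  let sorted_countries :=
    PySem.List.sorted2 medals.items
      (fun item => -(item.2.getD "Gold" 0)) (fun item => item.1)
  -- Step 4: Build CSV output
  let lines := sorted_countries.foldl
    (fun lines item =>
      lines ++ [PySem.Str.join "" [item.1, ",", PySem.Int.toStr (item.2.getD "Gold" 0), ",",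
        PySem.Int.toStr (item.2.getD "Silver" 0), ",", PySem.Int.toStr (item.2.getD "Bronze" 0), ",",
        PySem.Int.toStr (item.2.getD "Total" 0)]])
    ["Country,Gold,Silver,Bronze,Total"]
  PySem.Str.join "\n" lines

-- ===== PORT B =====
def pvTally (xs : List String) : PySem.Dict String Int :=
  xs.foldl (fun counts x => counts.insert x (counts.getD x 0 + 1)) PySem.Dict.empty

def count_medals_alt (winners : List (String × String × String)) : String :=
  let rows := winners
  let golds := pvTally (rows.map (fun r => r.1))
  let silvers := pvTally (rows.map (fun r => r.2.1))
  let bronzes := pvTally (rows.map (fun r => r.2.2))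
  let countries : PySem.Set String :=
    PySem.Set.union
      (PySem.Set.union (PySem.Set.ofList golds.keys) (PySem.Set.ofList silvers.keys))
      (PySem.Set.ofList bronzes.keys)
  let ordered := PySem.List.sorted2 countries (fun c => -(golds.getD c 0)) (fun c => c)
  let lines := ordered.foldl
    (fun lines c =>
      let g := golds.getD c 0
      let s := silvers.getD c 0
      let b := bronzes.getD c 0
      lines ++ [PySem.Str.join "" [c, ",", PySem.Int.toStr g, ",", PySem.Int.toStr s, ",",
        PySem.Int.toStr b, ",", PySem.Int.toStr (g + s + b)]])
    ["Country,Gold,Silver,Bronze,Total"]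
  PySem.Str.join "\n" lines

-- ===== PRECONDITION & SPEC =====
def Spec_count_medals (winners : List (String × String × String)) (out : String) : Prop := out = count_medals_alt winners
instance (winners : List (String × String × String)) (out : String) : Decidable (Spec_count_medals winners out) := by unfold Spec_count_medals; infer_instance

-- ===== CLAIM (what is proved, stated in full; the proofs are below) =====
def Claim_equal_count_medals : Prop := ∀ (winners : List (String × String × String)), Dom_count_medals winners → Spec_count_medals winners (count_medals winners)

-- ===== LEMMAS AND PROOFS =====

-- proof-side helpers
def pvInner0 : PySem.Dict String Int := PySem.Dict.ofList [("Gold", 0), ("Silver", 0), ("Bronze", 0)]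

def pvInnerD (g s b : Int) : PySem.Dict String Int :=
  PySem.Dict.ofList [("Gold", g), ("Silver", s), ("Bronze", b)]

def pvMicroStep (medals : PySem.Dict String (PySem.Dict String Int)) (cm : String × String) :
    PySem.Dict String (PySem.Dict String Int) :=
  let medals :=
    if medals.contains cm.1 then medals
    else medals.insert cm.1 (PySem.Dict.ofList [("Gold", 0), ("Silver", 0), ("Bronze", 0)])
  medals.modify cm.1 (PySem.Dict.ofList [("Gold", 0), ("Silver", 0), ("Bronze", 0)])
    (fun m => m.modify cm.2 0 (· + 1))

def pvTrip (r : String × String × String) : List (String × String) :=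
  [(r.1, "Gold"), (r.2.1, "Silver"), (r.2.2, "Bronze")]

def pvPairs (w : List (String × String × String)) : List (String × String) := w.flatMap pvTrip

def pvTotalize (m : PySem.Dict String Int) : PySem.Dict String Int :=
  m.insert "Total" (m.getD "Gold" 0 + m.getD "Silver" 0 + m.getD "Bronze" 0)

def pvStep2F (d : PySem.Dict String (PySem.Dict String Int)) (c : String) :
    PySem.Dict String (PySem.Dict String Int) :=
  d.modify c (PySem.Dict.ofList [("Gold", 0), ("Silver", 0), ("Bronze", 0)]) pvTotalize

-- tiny dict computations (all definitional)
lemma innerD_zero : pvInnerD 0 0 0 = pvInner0 := rfl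
lemma innerD_modify_gold (g s b : Int) :
    (pvInnerD g s b).modify "Gold" 0 (· + 1) = pvInnerD (g + 1) s b := rfl
lemma innerD_modify_silver (g s b : Int) :
    (pvInnerD g s b).modify "Silver" 0 (· + 1) = pvInnerD g (s + 1) b := rfl
lemma innerD_modify_bronze (g s b : Int) :
    (pvInnerD g s b).modify "Bronze" 0 (· + 1) = pvInnerD g s (b + 1) := rfl
lemma totalize_innerD (g s b : Int) :
    pvTotalize (pvInnerD g s b) = PySem.Dict.mk [("Gold", g), ("Silver", s), ("Bronze", b), ("Total", g + s + b)] := rfl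
lemma totalD_getD_gold (g s b t : Int) :
    (PySem.Dict.mk [("Gold", g), ("Silver", s), ("Bronze", b), ("Total", t)]).getD "Gold" 0 = g := rfl
lemma totalD_getD_silver (g s b t : Int) :
    (PySem.Dict.mk [("Gold", g), ("Silver", s), ("Bronze", b), ("Total", t)]).getD "Silver" 0 = s := rfl
lemma totalD_getD_bronze (g s b t : Int) :
    (PySem.Dict.mk [("Gold", g), ("Silver", s), ("Bronze", b), ("Total", t)]).getD "Bronze" 0 = b := rfl
lemma totalD_getD_total (g s b t : Int) :
    (PySem.Dict.mk [("Gold", g), ("Silver", s), ("Bronze", b), ("Total", t)]).getD "Total" 0 = t := rfl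

-- micro-step characterisation
lemma microStep_contains (d : PySem.Dict String (PySem.Dict String Int)) (p : String × String) (c : String) :
    (pvMicroStep d p).contains c = (c == p.1 || d.contains c) := by
  unfold pvMicroStep
  by_cases h : d.contains p.1 = true
  all_goals simp only [h, if_pos, Bool.false_eq_true, if_false, PySem.Dict.contains_modify,
    PySem.Dict.contains_insert]
  all_goals cases h2 : (c == p.1) <;> simp_all

lemma microStep_getD_ne (d : PySem.Dict String (PySem.Dict String Int)) (p : String × String)
    (c : String) (h : c ≠ p.1) :
    (pvMicroStep d p).getD c pvInner0 = d.getD c pvInner0 := by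
  unfold pvMicroStep
  simp only [show (PySem.Dict.ofList [("Gold", (0:Int)), ("Silver", 0), ("Bronze", 0)]) = pvInner0 from rfl]
  by_cases hc : d.contains p.1 = true <;>
    simp only [hc, if_pos, Bool.false_eq_true, if_false] <;>
    rw [PySem.Dict.getD_modify_of_ne _ _ _ h]
  rw [PySem.Dict.getD_insert_of_ne _ _ _ h]


lemma microStep_getD_self (d : PySem.Dict String (PySem.Dict String Int)) (p : String × String) :
    (pvMicroStep d p).getD p.1 pvInner0 = (d.getD p.1 pvInner0).modify p.2 0 (· + 1) := by
  unfold pvMicroStep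
  simp only [show (PySem.Dict.ofList [("Gold", (0:Int)), ("Silver", 0), ("Bronze", 0)]) = pvInner0 from rfl]
  by_cases hc : d.contains p.1 = true
  · simp only [hc, if_pos]
    rw [PySem.Dict.getD_modify_self]
  · simp only [hc, Bool.false_eq_true, if_false]
    rw [PySem.Dict.getD_modify_self, PySem.Dict.getD_insert_self,
      PySem.Dict.getD_of_not_contains d pvInner0 (by simpa using hc)]


lemma microStep_nodup (d : PySem.Dict String (PySem.Dict String Int)) (p : String × String)
    (h : d.keys.Nodup) : (pvMicroStep d p).keys.Nodup := by
  unfold pvMicroStep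
  by_cases hc : d.contains p.1 = true <;>
    simp only [hc, if_pos, Bool.false_eq_true, if_false] <;>
    rw [PySem.Dict.keys_modify] <;>
    exact PySem.Dict.nodup_keys_insert _ _ _ (by first | exact h | exact PySem.Dict.nodup_keys_insert _ _ _ h)


-- the step-1 loop invariant
lemma step1_inv (l : List (String × String))
    (hl : ∀ p ∈ l, p.2 = "Gold" ∨ p.2 = "Silver" ∨ p.2 = "Bronze")
    (q : List (String × String)) (d : PySem.Dict String (PySem.Dict String Int))
    (hc : ∀ c, d.contains c = (q.map Prod.fst).contains c)
    (hg : ∀ c, d.getD c pvInner0 =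
      pvInnerD ((q.count (c, "Gold") : Nat) : Int) ((q.count (c, "Silver") : Nat) : Int)
        ((q.count (c, "Bronze") : Nat) : Int)) :
    (∀ c, (l.foldl pvMicroStep d).contains c = (((q ++ l).map Prod.fst).contains c))
    ∧ (∀ c, (l.foldl pvMicroStep d).getD c pvInner0 =
      pvInnerD (((q ++ l).count (c, "Gold") : Nat) : Int) (((q ++ l).count (c, "Silver") : Nat) : Int)
        (((q ++ l).count (c, "Bronze") : Nat) : Int)) := by
  induction l generalizing q d with
  | nil =>
    refine ⟨?_, ?_⟩ <;> intro c <;> simp only [List.foldl_nil, List.append_nil]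
    · exact hc c
    · exact hg c
  | cons p l ih =>
    obtain ⟨pc, pm⟩ := p
    have hl' : ∀ x ∈ l, x.2 = "Gold" ∨ x.2 = "Silver" ∨ x.2 = "Bronze" := by
      intro x hx; exact hl x (List.mem_cons_of_mem _ hx)
    have hrw : q ++ (pc, pm) :: l = (q ++ [(pc, pm)]) ++ l := by simp
    rw [hrw, List.foldl_cons]
    apply ih hl' (q ++ [(pc, pm)]) (pvMicroStep d (pc, pm))
    · intro c
      rw [microStep_contains, hc c]
      cases hb : (c == pc) <;> simp_all
    · intro c
      by_cases hcp : c = pc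
      · subst hcp
        rcases hl (c, pm) List.mem_cons_self with hm | hm | hm <;> simp only at hm <;> subst hm <;>
          rw [microStep_getD_self, hg c] <;> simp only []
        · rw [innerD_modify_gold]
          have e1 : (q ++ [(c, "Gold")]).count (c, "Gold") = q.count (c, "Gold") + 1 := by
            simp [List.count_append]
          have e2 : (q ++ [(c, "Gold")]).count (c, "Silver") = q.count (c, "Silver") := by
            simp [List.count_append]
          have e3 : (q ++ [(c, "Gold")]).count (c, "Bronze") = q.count (c, "Bronze") := by
            simp [List.count_append]
          rw [e1, e2, e3]; push_cast; ring_nf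
        · rw [innerD_modify_silver]
          have e1 : (q ++ [(c, "Silver")]).count (c, "Gold") = q.count (c, "Gold") := by
            simp [List.count_append]
          have e2 : (q ++ [(c, "Silver")]).count (c, "Silver") = q.count (c, "Silver") + 1 := by
            simp [List.count_append]
          have e3 : (q ++ [(c, "Silver")]).count (c, "Bronze") = q.count (c, "Bronze") := by
            simp [List.count_append]
          rw [e1, e2, e3]; push_cast; ring_nf
        · rw [innerD_modify_bronze]
          have e1 : (q ++ [(c, "Bronze")]).count (c, "Gold") = q.count (c, "Gold") := by
            simp [List.count_append]
          have e2 : (q ++ [(c, "Bronze")]).count (c, "Silver") = q.count (c, "Silver") := by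
            simp [List.count_append]
          have e3 : (q ++ [(c, "Bronze")]).count (c, "Bronze") = q.count (c, "Bronze") + 1 := by
            simp [List.count_append]
          rw [e1, e2, e3]; push_cast; ring_nf
      · rw [microStep_getD_ne _ _ _ hcp, hg c]
        have e1 : (q ++ [(pc, pm)]).count (c, "Gold") = q.count (c, "Gold") := by
          simp only [List.count_append, List.count_cons, List.count_nil]
          have : (((pc, pm) : String × String) == (c, "Gold")) = false :=
            beq_eq_false_iff_ne.mpr (fun h => hcp (congrArg Prod.fst h).symm)
          simp [this]
        have e2 : (q ++ [(pc, pm)]).count (c, "Silver") = q.count (c, "Silver") := by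
          simp only [List.count_append, List.count_cons, List.count_nil]
          have : (((pc, pm) : String × String) == (c, "Silver")) = false :=
            beq_eq_false_iff_ne.mpr (fun h => hcp (congrArg Prod.fst h).symm)
          simp [this]
        have e3 : (q ++ [(pc, pm)]).count (c, "Bronze") = q.count (c, "Bronze") := by
          simp only [List.count_append, List.count_cons, List.count_nil]
          have : (((pc, pm) : String × String) == (c, "Bronze")) = false :=
            beq_eq_false_iff_ne.mpr (fun h => hcp (congrArg Prod.fst h).symm)
          simp [this]
        rw [e1, e2, e3]

lemma step1_nodup (l : List (String × String)) (d : PySem.Dict String (PySem.Dict String Int))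
    (h : d.keys.Nodup) : (l.foldl pvMicroStep d).keys.Nodup := by
  induction l generalizing d with
  | nil => simpa using h
  | cons p l ih => exact ih _ (microStep_nodup _ _ h)


-- the step-2 loop
lemma step2_inv (ks : List String) (d : PySem.Dict String (PySem.Dict String Int))
    (hnd : ks.Nodup) (hin : ∀ c ∈ ks, d.contains c = true) :
    (ks.foldl pvStep2F d).keys = d.keys ∧
    (∀ c, (ks.foldl pvStep2F d).getD c pvInner0 =
      if c ∈ ks then pvTotalize (d.getD c pvInner0) else d.getD c pvInner0) := by
  induction ks generalizing d with
  | nil => simp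
  | cons k ks ih =>
    have hk : d.contains k = true := hin k List.mem_cons_self
    have hkeys : (pvStep2F d k).keys = d.keys := by
      unfold pvStep2F
      rw [PySem.Dict.keys_modify, PySem.Dict.keys_insert_of_contains _ _ hk]
    have hcont : ∀ c, (pvStep2F d k).contains c = d.contains c := by
      intro c
      unfold pvStep2F
      rw [PySem.Dict.contains_modify]
      cases hb : (c == k)
      · simp
      · simp only [Bool.true_or]
        exact ((beq_iff_eq.mp hb) ▸ hk).symm
    have hgd : ∀ c, (pvStep2F d k).getD c pvInner0 =
        if c = k then pvTotalize (d.getD k pvInner0) else d.getD c pvInner0 := by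
      intro c
      unfold pvStep2F
      rw [show (PySem.Dict.ofList [("Gold", (0:Int)), ("Silver", 0), ("Bronze", 0)]) = pvInner0 from rfl,
        PySem.Dict.getD_modify]
    obtain ⟨hnd1, hnd2⟩ := List.nodup_cons.mp hnd
    obtain ⟨ih1, ih2⟩ := ih (pvStep2F d k) hnd2 (fun c hcks => by rw [hcont c]; exact hin c (List.mem_cons_of_mem _ hcks))
    refine ⟨by rw [List.foldl_cons, ih1, hkeys], ?_⟩
    intro c
    rw [List.foldl_cons, ih2 c]
    by_cases hck : c = k
    · subst hck
      simp [hnd1, hgd c]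
    · by_cases hmem : c ∈ ks <;> simp [hmem, hck, hgd c]


-- counting facts about the flattened pair list
lemma pairs_medal (w : List (String × String × String)) :
    ∀ p ∈ pvPairs w, p.2 = "Gold" ∨ p.2 = "Silver" ∨ p.2 = "Bronze" := by
  intro p hp
  simp only [pvPairs, List.mem_flatMap, pvTrip, List.mem_cons, List.not_mem_nil, or_false] at hp
  obtain ⟨r, -, hr⟩ := hp
  rcases hr with h | h | h <;> rw [h]
  · left; rfl
  · right; left; rfl
  · right; right; rfl


lemma pairs_fst_contains (w : List (String × String × String)) (c : String) :
    ((pvPairs w).map Prod.fst).contains c =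
      ((w.map (fun r => r.1)).contains c || (w.map (fun r => r.2.1)).contains c ||
        (w.map (fun r => r.2.2)).contains c) := by
  induction w with
  | nil => simp [pvPairs]
  | cons r w ih =>
    rw [show pvPairs (r :: w) = pvTrip r ++ pvPairs w from rfl, List.map_append,
      List.contains_append, ih]
    simp only [pvTrip, List.map_cons, List.map_nil, List.contains_cons, List.contains_nil]
    cases h1 : (c == r.1) <;> cases h2 : (c == r.2.1) <;> cases h3 : (c == r.2.2) <;> simp_all


lemma pairs_count_gold (w : List (String × String × String)) (c : String) :
    (pvPairs w).count (c, "Gold") = (w.map (fun r => r.1)).count c := by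
  induction w with
  | nil => simp [pvPairs]
  | cons r w ih =>
    rw [show pvPairs (r :: w) = pvTrip r ++ pvPairs w from rfl, List.count_append, ih,
      List.map_cons]
    simp only [pvTrip, List.count_cons, List.count_nil]
    have h1 : ((r.2.1, "Silver") == ((c, "Gold") : String × String)) = false := by
      cases hb : (r.2.1 == c) <;> simp_all
    have h2 : ((r.2.2, "Bronze") == ((c, "Gold") : String × String)) = false := by
      cases hb : (r.2.2 == c) <;> simp_all
    rw [h1, h2]
    cases hb : (r.1 == c) <;> simp_all [Nat.add_comm]


lemma pairs_count_silver (w : List (String × String × String)) (c : String) :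
    (pvPairs w).count (c, "Silver") = (w.map (fun r => r.2.1)).count c := by
  induction w with
  | nil => simp [pvPairs]
  | cons r w ih =>
    rw [show pvPairs (r :: w) = pvTrip r ++ pvPairs w from rfl, List.count_append, ih,
      List.map_cons]
    simp only [pvTrip, List.count_cons, List.count_nil]
    have h1 : ((r.1, "Gold") == ((c, "Silver") : String × String)) = false := by
      cases hb : (r.1 == c) <;> simp_all
    have h2 : ((r.2.2, "Bronze") == ((c, "Silver") : String × String)) = false := by
      cases hb : (r.2.2 == c) <;> simp_all
    rw [h1, h2]
    cases hb : (r.2.1 == c) <;> simp_all [Nat.add_comm]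


lemma pairs_count_bronze (w : List (String × String × String)) (c : String) :
    (pvPairs w).count (c, "Bronze") = (w.map (fun r => r.2.2)).count c := by
  induction w with
  | nil => simp [pvPairs]
  | cons r w ih =>
    rw [show pvPairs (r :: w) = pvTrip r ++ pvPairs w from rfl, List.count_append, ih,
      List.map_cons]
    simp only [pvTrip, List.count_cons, List.count_nil]
    have h1 : ((r.1, "Gold") == ((c, "Bronze") : String × String)) = false := by
      cases hb : (r.1 == c) <;> simp_all
    have h2 : ((r.2.1, "Silver") == ((c, "Bronze") : String × String)) = false := by
      cases hb : (r.2.1 == c) <;> simp_all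
    rw [h1, h2]
    cases hb : (r.2.2 == c) <;> simp_all [Nat.add_comm]


-- tally facts
lemma tally_getD (xs : List String) (c : String) :
    (pvTally xs).getD c 0 = ((xs.count c : Nat) : Int) := by
  unfold pvTally
  rw [PySem.Dict.getD_foldl_insert_add_one]
  simp [PySem.Dict.getD_empty]


lemma tally_keys_mem (xs : List String) (c : String) : c ∈ (pvTally xs).keys ↔ c ∈ xs := by
  unfold pvTally
  rw [PySem.Dict.keys_foldl_insert]
  simp [PySem.Dict.keys_empty, PySem.Set.mem_update]



-- sorted2 is sorted under the lexicographic key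
lemma sorted2_eq_sorted_lex {α : Type} (xs : List α) (k1 : α → Int) (k2 : α → String) :
    PySem.List.sorted2 xs k1 k2 = PySem.List.sorted xs (fun x => toLex (k1 x, k2 x)) := by
  rw [PySem.List.sorted_eq_foldl_insertBy]
  show List.foldl (fun acc x => PySem.List.insertBy _ x acc) [] xs = _
  have hb : (fun a b => decide (k1 a < k1 b) || (!decide (k1 b < k1 a) && decide (k2 a < k2 b)))
      = (fun a b : α => decide (toLex (k1 a, k2 a) < toLex (k1 b, k2 b))) := by
    funext a b
    rcases lt_trichotomy (k1 a) (k1 b) with h | h | h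
    · simp [h, Prod.Lex.lt_iff, not_lt_of_gt h]
    · simp [h, Prod.Lex.lt_iff]
    · simp [h, Prod.Lex.lt_iff, not_lt_of_gt h, ne_of_gt h]
  simp only [hb, Bool.false_eq_true, if_false]


lemma insertBy_map {α β : Type} (b : β → β → Bool) (f : α → β) (x : α) (l : List α) :
    PySem.List.insertBy b (f x) (l.map f) =
      (PySem.List.insertBy (fun u v => b (f u) (f v)) x l).map f := by
  induction l with
  | nil => simp [PySem.List.insertBy]
  | cons y l ih =>
    simp only [List.map_cons, PySem.List.insertBy]
    by_cases h : b (f x) (f y) = true <;> simp [h, ih]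


lemma sorted_map {α β κ : Type} [LinearOrder κ] (xs : List α) (f : α → β) (key : β → κ) :
    PySem.List.sorted (xs.map f) key = (PySem.List.sorted xs (fun x => key (f x))).map f := by
  rw [PySem.List.sorted_eq_foldl_insertBy, PySem.List.sorted_eq_foldl_insertBy, List.foldl_map]
  suffices h : ∀ (xs : List α) (acc : List α),
      List.foldl (fun a x => PySem.List.insertBy (fun u v => decide (key u < key v)) (f x) a)
        (acc.map f) xs =
      (List.foldl (fun a x => PySem.List.insertBy (fun u v => decide (key (f u) < key (f v))) x a)
        acc xs).map f by
    simpa using h xs []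
  intro xs
  induction xs with
  | nil => simp
  | cons x xs ih =>
    intro acc
    simp only [List.foldl_cons]
    rw [insertBy_map (fun u v => decide (key u < key v)) f x acc, ih]


-- the shared sort key
def pvK (w : List (String × String × String)) (c : String) : Lex (Int × String) :=
  toLex (-(((w.map (fun r => r.1)).count c : Nat) : Int), c)

lemma pvK_injective (w : List (String × String × String)) : Function.Injective (pvK w) := by
  intro a b h
  exact congrArg (fun x => (ofLex x).2) h



-- reference forms of the two step-loops and the final characterisations
def pvStep1 (w : List (String × String × String)) : PySem.Dict String (PySem.Dict String Int) :=
  (pvPairs w).foldl pvMicroStep PySem.Dict.empty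

def pvStep2 (w : List (String × String × String)) : PySem.Dict String (PySem.Dict String Int) :=
  (pvStep1 w).keys.foldl pvStep2F (pvStep1 w)

lemma count_medals_eq (w : List (String × String × String)) :
    count_medals w = PySem.Str.join "\n" ("Country,Gold,Silver,Bronze,Total" ::
      (PySem.List.sorted2 (pvStep2 w).items
        (fun item => -(item.2.getD "Gold" 0)) (fun item => item.1)).map
        (fun item => PySem.Str.join "" [item.1, ",", PySem.Int.toStr (item.2.getD "Gold" 0), ",",
          PySem.Int.toStr (item.2.getD "Silver" 0), ",", PySem.Int.toStr (item.2.getD "Bronze" 0), ",",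
          PySem.Int.toStr (item.2.getD "Total" 0)])) := by
  simp only [count_medals]
  rw [PySem.List.foldl_append_singleton_eq_map]
  unfold pvStep2 pvStep1 pvPairs
  rw [List.foldl_flatMap]
  rfl

lemma count_medals_alt_eq (w : List (String × String × String)) :
    count_medals_alt w = PySem.Str.join "\n" ("Country,Gold,Silver,Bronze,Total" ::
      (PySem.List.sorted2
        (PySem.Set.union
          (PySem.Set.union (PySem.Set.ofList (pvTally (w.map (fun r => r.1))).keys)
            (PySem.Set.ofList (pvTally (w.map (fun r => r.2.1))).keys))
          (PySem.Set.ofList (pvTally (w.map (fun r => r.2.2))).keys))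
        (fun c => -((pvTally (w.map (fun r => r.1))).getD c 0)) (fun c => c)).map
        (fun c => PySem.Str.join "" [c, ",",
          PySem.Int.toStr ((pvTally (w.map (fun r => r.1))).getD c 0), ",",
          PySem.Int.toStr ((pvTally (w.map (fun r => r.2.1))).getD c 0), ",",
          PySem.Int.toStr ((pvTally (w.map (fun r => r.2.2))).getD c 0), ",",
          PySem.Int.toStr ((pvTally (w.map (fun r => r.1))).getD c 0 +
            (pvTally (w.map (fun r => r.2.1))).getD c 0 +
            (pvTally (w.map (fun r => r.2.2))).getD c 0)])) := by
  simp only [count_medals_alt]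
  rw [PySem.List.foldl_append_singleton_eq_map]
  rfl

-- ===== VERDICT
theorem count_medals_spec : Claim_equal_count_medals := by
  intro w _
  unfold Spec_count_medals
  rw [count_medals_eq, count_medals_alt_eq]
  -- column lists
  set gl := w.map (fun r => r.1) with hgl
  set sl := w.map (fun r => r.2.1) with hsl
  set bl := w.map (fun r => r.2.2) with hbl
  -- STEP 1 characterisation
  obtain ⟨h1c, h1g⟩ := step1_inv (pvPairs w) (pairs_medal w) [] PySem.Dict.empty
    (fun c => by simp [PySem.Dict.contains_empty])
    (fun c => by simp [PySem.Dict.getD_empty, innerD_zero])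
  simp only [List.nil_append] at h1c h1g
  have h1c' : ∀ c, (pvStep1 w).contains c = ((pvPairs w).map Prod.fst).contains c := h1c
  have h1g' : ∀ c, (pvStep1 w).getD c pvInner0 =
      pvInnerD (((pvPairs w).count (c, "Gold") : Nat) : Int)
        (((pvPairs w).count (c, "Silver") : Nat) : Int)
        (((pvPairs w).count (c, "Bronze") : Nat) : Int) := h1g
  have nodup1 : (pvStep1 w).keys.Nodup := step1_nodup _ _ (by simp [PySem.Dict.keys_empty])
  -- STEP 2 characterisation
  obtain ⟨h2keys, h2g⟩ := step2_inv (pvStep1 w).keys (pvStep1 w) nodup1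
    (fun c hc => (PySem.Dict.contains_iff_mem_keys _ _).mpr hc)
  have h2keys' : (pvStep2 w).keys = (pvStep1 w).keys := h2keys
  have h2g' : ∀ c, (pvStep2 w).getD c pvInner0 =
      if c ∈ (pvStep1 w).keys then pvTotalize ((pvStep1 w).getD c pvInner0)
      else (pvStep1 w).getD c pvInner0 := h2g
  have nodup2 : (pvStep2 w).keys.Nodup := by rw [h2keys']; exact nodup1
  -- membership of the step-1 keys
  have hmem1 : ∀ c, c ∈ (pvStep1 w).keys ↔ (c ∈ gl ∨ c ∈ sl ∨ c ∈ bl) := by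
    intro c
    rw [← PySem.Dict.contains_iff_mem_keys, h1c' c, pairs_fst_contains]
    simp only [Bool.or_eq_true, List.contains_iff_mem, or_assoc]
    exact Iff.rfl
  -- value of the step-2 dict on a member country
  have hval : ∀ c ∈ (pvStep1 w).keys, (pvStep2 w).getD c pvInner0 =
      PySem.Dict.mk [("Gold", ((gl.count c : Nat) : Int)), ("Silver", ((sl.count c : Nat) : Int)),
        ("Bronze", ((bl.count c : Nat) : Int)),
        ("Total", ((gl.count c : Nat) : Int) + ((sl.count c : Nat) : Int) + ((bl.count c : Nat) : Int))] := by
    intro c hc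
    rw [h2g' c, if_pos hc, h1g' c, pairs_count_gold, pairs_count_silver, pairs_count_bronze,
      totalize_innerD]
  -- the three tallies
  have htg : ∀ c, (pvTally gl).getD c 0 = ((gl.count c : Nat) : Int) := tally_getD gl
  have hts : ∀ c, (pvTally sl).getD c 0 = ((sl.count c : Nat) : Int) := tally_getD sl
  have htb : ∀ c, (pvTally bl).getD c 0 = ((bl.count c : Nat) : Int) := tally_getD bl
  -- the country set of B
  set countries := PySem.Set.union
    (PySem.Set.union (PySem.Set.ofList (pvTally gl).keys) (PySem.Set.ofList (pvTally sl).keys))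
    (PySem.Set.ofList (pvTally bl).keys) with hcountries
  have hmemC : ∀ c, c ∈ countries ↔ (c ∈ gl ∨ c ∈ sl ∨ c ∈ bl) := by
    intro c
    rw [hcountries]
    rw [PySem.Set.mem_union, PySem.Set.mem_union, PySem.Set.mem_ofList, PySem.Set.mem_ofList,
      PySem.Set.mem_ofList, tally_keys_mem, tally_keys_mem, tally_keys_mem, or_assoc]
  have hndC : countries.Nodup := by
    rw [hcountries]
    exact PySem.Set.nodup_union _ _ (PySem.Set.nodup_union _ _ (PySem.Set.nodup_ofList _))
  -- the canonical sorted country list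
  set C := PySem.List.sorted countries (pvK w) with hC
  have hpermC : countries.Perm (pvStep2 w).keys := by
    rw [List.perm_ext_iff_of_nodup hndC nodup2]
    intro c
    rw [hmemC c, h2keys', hmem1 c]
  have hCco : C.Perm countries := PySem.List.sorted_perm countries (pvK w) false
  have hCmem : ∀ c ∈ C, c ∈ (pvStep1 w).keys := by
    intro c hc
    exact (hmem1 c).mpr ((hmemC c).mp (hCco.mem_iff.mp hc))
  -- B's sort key is the canonical key
  have hkeyB : (fun c => -((pvTally gl).getD c 0)) = (fun c => -((gl.count c : Nat) : Int)) := by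
    funext c; rw [htg c]
  rw [hkeyB, sorted2_eq_sorted_lex countries _ _]
  have hsortB : PySem.List.sorted countries
      (fun c => toLex (-((gl.count c : Nat) : Int), c)) = C := by rw [hC]; rfl
  rw [hsortB]
  -- A's items and sort
  have hitems : (pvStep2 w).items =
      (pvStep2 w).keys.map (fun c => (c, (pvStep2 w).getD c pvInner0)) :=
    PySem.Dict.items_eq_map_keys _ nodup2 _
  rw [sorted2_eq_sorted_lex, hitems, sorted_map]
  have hsortA : PySem.List.sorted (pvStep2 w).keys
      (fun c => toLex (-(((c, (pvStep2 w).getD c pvInner0)).2.getD "Gold" 0),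
        ((c, (pvStep2 w).getD c pvInner0)).1)) = C := by
    apply PySem.List.sorted_eq_of_perm_of_pairwise_lt
    · exact hCco.trans hpermC
    · have hle := PySem.List.sorted_pairwise countries (pvK w)
      have hnd : C.Nodup := (hCco.nodup_iff).mpr hndC
      rw [← hC] at hle
      refine ((hle.and hnd).imp_of_mem ?_)
      intro a b ha hb hab
      have hka : pvK w a = toLex (-(((pvStep2 w).getD a pvInner0).getD "Gold" 0), a) := by
        rw [hval a (hCmem a ha), totalD_getD_gold]; rfl
      have hkb : pvK w b = toLex (-(((pvStep2 w).getD b pvInner0).getD "Gold" 0), b) := by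
        rw [hval b (hCmem b hb), totalD_getD_gold]; rfl
      have hlt : pvK w a < pvK w b :=
        lt_of_le_of_ne hab.1 (fun h => hab.2 (pvK_injective w h))
      rw [hka, hkb] at hlt
      exact hlt
  rw [hsortA, List.map_map]
  -- the per-line strings agree
  congr 1
  refine congrArg _ (List.map_congr_left ?_)
  intro c hc
  have hkc := hCmem c hc
  simp only [Function.comp]
  rw [hval c hkc, totalD_getD_gold, totalD_getD_silver, totalD_getD_bronze, totalD_getD_total,
    htg c, hts c, htb c]
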